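-- pv_equiv track=rewrite | github.com/JoyKkk/AiSDCompressing | output/final_report_gen.py | lzss_size
-- ===== SOURCE A (Python) =====
-- def lzss_size(data):
--     # Based on your study, we use 4KB window
--     i = 0; size = 0
--     while i < len(data):
--         m_len = 0
--         for j in range(max(0, i-4096), i):
--             l = 0
--             while i+l < len(data) and data[j+l] == data[i+l] and l < 255: l += 1
--             m_len = max(m_len, l)
--         if m_len > 2: size += 3; i += m_len
--         else: size += 2; i += 1
--     return size
-- ===== SOURCE B (Python) =====
-- def lzss_size(data):
--     # Value-indexed candidate search: only window positions holding the same
--     # value as data[i] can start a nonzero match, so keep a dict value -> list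
--     # of past positions and scan just those instead of the whole 4KB window.
--     n = len(data)
--     index = {}
--     i = 0
--     size = 0
--     while i < n:
--         lo = i - 4096 if i > 4096 else 0
--         m = 0
--         for j in index.get(data[i], ()):
--             if j >= lo:
--                 l = 0
--                 while i + l < n and data[j + l] == data[i + l] and l < 255:
--                     l += 1
--                 if l > m:
--                     m = l
--         step = m if m > 2 else 1
--         size += 3 if m > 2 else 2
--         for k in range(i, i + step):
--             index.setdefault(data[k], []).append(k)
--         i += step
--     return size
-- ===== Notes on version B (the rewrite author's own statement) =====
-- stated objective: faster
-- what changed: Replaces the full 4096-position window scan at each step by a dict from value to past positions, so only candidate positions that actually match data[i] (the only ones that can start a nonzero match) are extended.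
import Mathlib
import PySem

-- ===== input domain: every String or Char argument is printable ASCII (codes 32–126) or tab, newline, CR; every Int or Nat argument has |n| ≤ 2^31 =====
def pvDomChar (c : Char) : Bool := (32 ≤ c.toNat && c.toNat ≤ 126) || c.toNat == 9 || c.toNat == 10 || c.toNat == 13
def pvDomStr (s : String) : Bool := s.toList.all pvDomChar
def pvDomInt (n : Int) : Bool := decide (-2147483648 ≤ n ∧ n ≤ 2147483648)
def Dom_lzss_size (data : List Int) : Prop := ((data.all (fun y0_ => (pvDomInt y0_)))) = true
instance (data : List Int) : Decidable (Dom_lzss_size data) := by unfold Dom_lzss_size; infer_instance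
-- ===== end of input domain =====

-- B replaces A's full-window scan by a value-indexed candidate search (faster; same result).

-- ===== PORT A =====
-- the inner `while` of A (and of B): greedy match length from j against i, capped at 255
def pvMlen (data : List Int) (j i l : Nat) : Nat :=
  if h : i + l < data.length ∧ data.getD (j + l) 0 = data.getD (i + l) 0 ∧ l < 255 then
    pvMlen data j i (l + 1)
  else l
termination_by 255 - l
decreasing_by omega

-- A's inner `for j in range(max(0, i-4096), i)` computing m_len
def pvMaxA (data : List Int) (i : Nat) : Nat :=
  (List.range' (i - 4096) (i - (i - 4096))).foldl
    (fun acc j => max acc (pvMlen data j i 0)) 0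

def pvLoopA (data : List Int) (i : Nat) (size : Int) : Int :=
  if h : i < data.length then
    if hm : pvMaxA data i > 2 then pvLoopA data (i + pvMaxA data i) (size + 3)
    else pvLoopA data (i + 1) (size + 2)
  else size
termination_by data.length - i
decreasing_by all_goals omega

def lzss_size (data : List Int) : Int := pvLoopA data 0 0

-- ===== PORT B =====
-- B's `for j in index.get(data[i], ()): if j >= lo: ...` computing m
def pvMaxB (data : List Int) (idx : PySem.Dict Int (List Nat)) (i : Nat) : Nat :=
  (idx.getD (data.getD i 0) []).foldl
    (fun acc j =>
      if i - 4096 ≤ j then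
        (if acc < pvMlen data j i 0 then pvMlen data j i 0 else acc)
      else acc) 0

-- B's `for k in range(i, i+step): index.setdefault(data[k], []).append(k)`
def pvUpd (data : List Int) (idx : PySem.Dict Int (List Nat)) (i step : Nat) :
    PySem.Dict Int (List Nat) :=
  (List.range' i step).foldl (fun d k => d.modify (data.getD k 0) [] (· ++ [k])) idx

def pvLoopB (data : List Int) (idx : PySem.Dict Int (List Nat)) (i : Nat) (size : Int) : Int :=
  if h : i < data.length then
    let m := pvMaxB data idx i
    let step := if m > 2 then m else 1
    pvLoopB data (pvUpd data idx i step) (i + step) (size + if m > 2 then 3 else 2)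
  else size
termination_by data.length - i
decreasing_by split_ifs <;> omega

def lzss_size_alt (data : List Int) : Int := pvLoopB data PySem.Dict.empty 0 0

-- ===== PRECONDITION & SPEC =====
def Spec_lzss_size (data : List Int) (out : Int) : Prop := out = lzss_size_alt data
instance (data : List Int) (out : Int) : Decidable (Spec_lzss_size data out) := by unfold Spec_lzss_size; infer_instance

-- ===== CLAIM (what is proved, stated in full; the proofs are below) =====
def Claim_equal_lzss_size : Prop := ∀ (data : List Int), Dom_lzss_size data → Spec_lzss_size data (lzss_size data)

-- ===== LEMMAS AND PROOFS =====

-- dict invariant of B's loop: positions indexed so far are exactly those below i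
def pvInv (data : List Int) (i : Nat) (idx : PySem.Dict Int (List Nat)) : Prop :=
  ∀ v : Int, idx.getD v [] = (List.range i).filter (fun p => data.getD p 0 == v)

theorem pvMlen_zero (data : List Int) (j i : Nat)
    (hne : data.getD j 0 ≠ data.getD i 0) : pvMlen data j i 0 = 0 := by
  rw [pvMlen, dif_neg]
  intro hcon
  exact hne (by simpa using hcon.2.1)

theorem pv_foldl_guard (g : Nat → Nat) (lo : Nat) :
    ∀ (l : List Nat) (a : Nat),
      l.foldl (fun acc j => if lo ≤ j then (if acc < g j then g j else acc) else acc) a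
        = (l.filter (fun j => decide (lo ≤ j))).foldl (fun acc j => max acc (g j)) a := by
  intro l
  induction l with
  | nil => intro a; simp
  | cons x t ih =>
    intro a
    by_cases hx : lo ≤ x
    · have hmax : (if a < g x then g x else a) = max a (g x) := by split <;> omega
      simp [hx, hmax, ih]
    · simp [hx, ih]

theorem pv_foldl_max_congr (g : Nat → Nat) (q : Nat → Bool) :
    ∀ (l : List Nat) (a : Nat), (∀ j ∈ l, q j = false → g j = 0) →
      l.foldl (fun acc j => max acc (g j)) a
        = (l.filter q).foldl (fun acc j => max acc (g j)) a := by
  intro l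
  induction l with
  | nil => intro a _; simp
  | cons x t ih =>
    intro a hz
    by_cases hx : q x = true
    · simp [hx]
      exact ih _ (fun j hj => hz j (List.mem_cons_of_mem _ hj))
    · have hx' : q x = false := by simpa using hx
      have hg : g x = 0 := hz x (List.mem_cons_self) hx'
      simp [hx', hg]
      exact ih _ (fun j hj => hz j (List.mem_cons_of_mem _ hj))

theorem pv_range'_append : ∀ (n s m : Nat),
    List.range' s n ++ List.range' (s + n) m = List.range' s (n + m) := by
  intro n
  induction n with
  | zero => intro s m; simp
  | succ k ih =>
    intro s m
    rw [List.range'_succ, List.cons_append, show s + (k + 1) = (s + 1) + k by omega,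
        ih (s + 1) m, show k + 1 + m = (k + m) + 1 by omega, List.range'_succ]

theorem pv_range_split (lo i : Nat) (h : lo ≤ i) :
    List.range i = List.range' 0 lo ++ List.range' lo (i - lo) := by
  have h2 := pv_range'_append lo 0 (i - lo)
  rw [Nat.zero_add] at h2
  rw [List.range_eq_range', h2]
  congr 1
  omega

theorem pv_window_filter (q : Nat → Bool) (lo i : Nat) (h : lo ≤ i) :
    ((List.range i).filter q).filter (fun j => decide (lo ≤ j))
      = (List.range' lo (i - lo)).filter q := by
  rw [List.filter_comm, pv_range_split lo i h, List.filter_append]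
  have h1 : (List.range' 0 lo).filter (fun j => decide (lo ≤ j)) = [] := by
    rw [List.filter_eq_nil_iff]
    intro a ha
    have := List.mem_range'_1.mp ha
    simp; omega
  have h2 : (List.range' lo (i - lo)).filter (fun j => decide (lo ≤ j))
      = List.range' lo (i - lo) := by
    rw [List.filter_eq_self]
    intro a ha
    have := List.mem_range'_1.mp ha
    simp; omega
  rw [h1, h2]
  simp

theorem pvMax_eq (data : List Int) (idx : PySem.Dict Int (List Nat)) (i : Nat)
    (hinv : pvInv data i idx) : pvMaxB data idx i = pvMaxA data i := by
  unfold pvMaxB pvMaxA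
  set g : Nat → Nat := fun j => pvMlen data j i 0 with hg
  set q : Nat → Bool := fun p => data.getD p 0 == data.getD i 0 with hq
  rw [hinv (data.getD i 0), pv_foldl_guard g (i - 4096)]
  rw [pv_window_filter q (i - 4096) i (by omega)]
  rw [← pv_foldl_max_congr g q]
  intro j _ hj
  apply pvMlen_zero
  intro hc
  rw [hq] at hj
  simp only [hc] at hj
  simp at hj

theorem pv_inv_upd (data : List Int) (i step : Nat) (idx : PySem.Dict Int (List Nat))
    (hinv : pvInv data i idx) : pvInv data (i + step) (pvUpd data idx i step) := by
  intro v
  unfold pvUpd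
  have h1 : (List.range' i step).foldl (fun d k => d.modify (data.getD k 0) [] (· ++ [k])) idx
      = ((List.range' i step).map (fun k => ((data.getD k 0 : Int), k))).foldl
          (fun d p => d.modify p.1 [] (· ++ [p.2])) idx := by
    rw [List.foldl_map]
  rw [h1, PySem.Dict.getD_foldl_modify_append, hinv v]
  rw [pv_range_split i (i + step) (by omega), show i + step - i = step by omega,
      List.filter_append, ← List.range_eq_range']
  congr 1
  rw [List.filter_map, List.map_map]
  simp [Function.comp_def]

theorem pv_loop_eq (data : List Int) :
    ∀ (k i : Nat) (size : Int) (idx : PySem.Dict Int (List Nat)),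
      data.length - i ≤ k → pvInv data i idx →
      pvLoopB data idx i size = pvLoopA data i size := by
  intro k
  induction k with
  | zero =>
    intro i size idx hk _
    unfold pvLoopB pvLoopA
    rw [dif_neg (by omega), dif_neg (by omega)]
  | succ k ih =>
    intro i size idx hk hinv
    by_cases h : i < data.length
    · unfold pvLoopB pvLoopA
      rw [dif_pos h, dif_pos h]
      simp only [pvMax_eq data idx i hinv]
      by_cases hm : pvMaxA data i > 2
      · rw [if_pos hm, if_pos hm, dif_pos hm]
        exact ih (i + pvMaxA data i) (size + 3)
          (pvUpd data idx i (pvMaxA data i)) (by omega)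
          (pv_inv_upd data i (pvMaxA data i) idx hinv)
      · rw [if_neg hm, if_neg hm, dif_neg hm]
        exact ih (i + 1) (size + 2) (pvUpd data idx i 1) (by omega)
          (pv_inv_upd data i 1 idx hinv)
    · unfold pvLoopB pvLoopA
      rw [dif_neg h, dif_neg h]

-- ===== VERDICT (by name: the statement is the Claim_ definition above) =====
theorem lzss_size_spec : Claim_equal_lzss_size := by
  intro data _
  unfold Spec_lzss_size lzss_size lzss_size_alt
  exact (pv_loop_eq data data.length 0 0 PySem.Dict.empty (by omega)
    (fun v => by simp [PySem.Dict.getD_empty])).symm
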